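-- pv_equiv track=rewrite | github.com/Blaster2398/5g_proj | Smart_Parking_5G/stream_engine.py | _path_instructions
-- ===== SOURCE A (Python) =====
-- def _path_instructions(points):
--     if len(points) < 2:
--         return ["Hold position"]
--     instructions = ["Move to lane center"]
--     for i in range(1, len(points)):
--         dx = points[i][0] - points[i - 1][0]
--         dy = points[i][1] - points[i - 1][1]
--         if abs(dx) > abs(dy):
--             instructions.append("Turn right" if dx > 0 else "Turn left")
--         else:
--             instructions.append("Go straight" if dy < 0 else "Proceed down-lane")
--     instructions.append("Arrive at destination")
--     dedup = []
--     for text in instructions: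
--         if not dedup or dedup[-1] != text:
--             dedup.append(text)
--     return dedup
-- ===== SOURCE B (Python) =====
-- def _path_instructions(points):
--     if len(points) < 2:
--         return ["Hold position"]
--     out = ["Move to lane center"]
--     last = "Move to lane center"
--     for (x0, y0), (x1, y1) in zip(points, points[1:]):
--         dx = x1 - x0
--         dy = y1 - y0
--         if abs(dx) > abs(dy):
--             label = "Turn right" if dx > 0 else "Turn left"
--         else:
--             label = "Go straight" if dy < 0 else "Proceed down-lane"
--         if label != last:
--             out.append(label)
--             last = label
--     out.append("Arrive at destination")
--     return out
-- ===== Notes on version B (the rewrite author's own statement) =====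
-- stated objective: simpler
-- what changed: B fuses label generation and deduplication into one pass over zipped consecutive point pairs that tracks only the last emitted label, removing A's intermediate instruction list, its index-based loop and its separate dedup pass.
import Mathlib
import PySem

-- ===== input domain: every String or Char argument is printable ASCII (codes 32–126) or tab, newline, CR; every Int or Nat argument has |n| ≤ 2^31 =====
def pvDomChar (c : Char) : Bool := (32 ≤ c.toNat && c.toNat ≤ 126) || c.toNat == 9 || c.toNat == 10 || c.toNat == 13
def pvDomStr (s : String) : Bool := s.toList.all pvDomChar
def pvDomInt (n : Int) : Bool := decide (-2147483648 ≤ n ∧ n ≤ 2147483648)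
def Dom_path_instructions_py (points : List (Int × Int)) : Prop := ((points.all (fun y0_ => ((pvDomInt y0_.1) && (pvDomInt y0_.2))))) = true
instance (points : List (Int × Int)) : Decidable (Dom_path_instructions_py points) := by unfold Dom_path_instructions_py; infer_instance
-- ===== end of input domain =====

-- B fuses label generation and consecutive-deduplication into one pass over zipped
-- consecutive point pairs, tracking only the last emitted label (objective: simpler).

-- ===== PORT A =====
def path_instructions_py (points : List (Int × Int)) : List String :=
  if points.length < 2 then ["Hold position"]
  else
    let instructions :=
      (PySem.List.pyRange 1 points.length 1).foldl (fun instructions i =>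
        let dx := (PySem.List.pyGetD points i (0, 0)).1 - (PySem.List.pyGetD points (i - 1) (0, 0)).1
        let dy := (PySem.List.pyGetD points i (0, 0)).2 - (PySem.List.pyGetD points (i - 1) (0, 0)).2
        if |dx| > |dy| then
          instructions ++ [if dx > 0 then "Turn right" else "Turn left"]
        else
          instructions ++ [if dy < 0 then "Go straight" else "Proceed down-lane"])
        ["Move to lane center"]
    let instructions := instructions ++ ["Arrive at destination"]
    instructions.foldl (fun dedup text =>
      if dedup = [] ∨ PySem.List.pyGet? dedup (-1) ≠ some text then dedup ++ [text] else dedup) []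

-- ===== PORT B =====
def path_instructions_py_alt (points : List (Int × Int)) : List String :=
  if points.length < 2 then ["Hold position"]
  else
    let st :=
      (points.zip (points.drop 1)).foldl (fun (st : List String × String) pq =>
        let dx := pq.2.1 - pq.1.1
        let dy := pq.2.2 - pq.1.2
        let label :=
          if |dx| > |dy| then (if dx > 0 then "Turn right" else "Turn left")
          else (if dy < 0 then "Go straight" else "Proceed down-lane")
        if label ≠ st.2 then (st.1 ++ [label], label) else st)
        (["Move to lane center"], "Move to lane center")
    st.1 ++ ["Arrive at destination"]

-- ===== PRECONDITION & SPEC =====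
def Spec_path_instructions_py (points : List (Int × Int)) (out : List String) : Prop := out = path_instructions_py_alt points
instance (points : List (Int × Int)) (out : List String) : Decidable (Spec_path_instructions_py points out) := by unfold Spec_path_instructions_py; infer_instance

-- ===== CLAIM (what is proved, stated in full; the proofs are below) =====
def Claim_equal_path_instructions_py : Prop := ∀ (points : List (Int × Int)), Dom_path_instructions_py points → Spec_path_instructions_py points (path_instructions_py points)

-- ===== LEMMAS AND PROOFS =====

-- proof helpers: the shared label function, A's dedup step, B's fused step
def pvLab (p q : Int × Int) : String :=
  if |q.1 - p.1| > |q.2 - p.2| then (if q.1 - p.1 > 0 then "Turn right" else "Turn left")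
  else (if q.2 - p.2 < 0 then "Go straight" else "Proceed down-lane")

def pvD (dedup : List String) (t : String) : List String :=
  if dedup = [] ∨ dedup.getLast? ≠ some t then dedup ++ [t] else dedup

def pvB (st : List String × String) (t : String) : List String × String :=
  if t ≠ st.2 then (st.1 ++ [t], t) else st

theorem pvLab_ne (p q : Int × Int) : pvLab p q ≠ "Arrive at destination" := by
  unfold pvLab; split_ifs <;> decide

-- index-based label list = label list over zipped consecutive pairs
theorem pvZipRange (xs : List (Int × Int)) :
    (List.range (xs.length - 1)).map
      (fun k => pvLab (xs.getD k (0, 0)) (xs.getD (k + 1) (0, 0)))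
    = (xs.zip (xs.drop 1)).map (fun pq => pvLab pq.1 pq.2) := by
  induction xs with
  | nil => rfl
  | cons p tl ih =>
    cases tl with
    | nil => rfl
    | cons q rest =>
      have hlen : (p :: q :: rest).length - 1 = ((q :: rest).length - 1) + 1 := by
        simp
      rw [hlen, List.range_succ_eq_map, List.map_cons, List.map_map]
      have hfun : ((fun k => pvLab ((p :: q :: rest).getD k (0, 0)) ((p :: q :: rest).getD (k + 1) (0, 0))) ∘ Nat.succ)
          = fun k => pvLab ((q :: rest).getD k (0, 0)) ((q :: rest).getD (k + 1) (0, 0)) := by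
        funext k; rfl
      rw [hfun, ih]
      rfl

-- A's generation fold produces the seed followed by the pairwise labels
theorem pvFold_gen (points : List (Int × Int)) :
    (PySem.List.pyRange 1 (points.length : Int) 1).foldl
      (fun instructions i =>
        let dx := (PySem.List.pyGetD points i (0, 0)).1 - (PySem.List.pyGetD points (i - 1) (0, 0)).1
        let dy := (PySem.List.pyGetD points i (0, 0)).2 - (PySem.List.pyGetD points (i - 1) (0, 0)).2
        if |dx| > |dy| then
          instructions ++ [if dx > 0 then "Turn right" else "Turn left"]
        else
          instructions ++ [if dy < 0 then "Go straight" else "Proceed down-lane"])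
      ["Move to lane center"]
    = "Move to lane center" :: (points.zip (points.drop 1)).map (fun pq => pvLab pq.1 pq.2) := by
  have hbody : (fun (instructions : List String) (i : Int) =>
        let dx := (PySem.List.pyGetD points i (0, 0)).1 - (PySem.List.pyGetD points (i - 1) (0, 0)).1
        let dy := (PySem.List.pyGetD points i (0, 0)).2 - (PySem.List.pyGetD points (i - 1) (0, 0)).2
        if |dx| > |dy| then
          instructions ++ [if dx > 0 then "Turn right" else "Turn left"]
        else
          instructions ++ [if dy < 0 then "Go straight" else "Proceed down-lane"])
      = fun instructions i =>
          instructions ++ [pvLab (PySem.List.pyGetD points (i - 1) (0, 0)) (PySem.List.pyGetD points i (0, 0))] := by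
    funext instructions i
    simp only [pvLab]
    split_ifs <;> rfl
  rw [hbody, PySem.List.foldl_append_singleton_eq_map, PySem.List.pyRange_one, List.map_map]
  have htn : ((points.length : Int) - 1).toNat = points.length - 1 := by omega
  rw [htn]
  have hfun : ((fun i => pvLab (PySem.List.pyGetD points (i - 1) (0, 0)) (PySem.List.pyGetD points i (0, 0))) ∘ fun k : Nat => (1 : Int) + k)
      = fun k : Nat => pvLab (points.getD k (0, 0)) (points.getD (k + 1) (0, 0)) := by
    funext k
    have h2 : (1 : Int) + (k : Int) = ((k + 1 : Nat) : Int) := by push_cast; ring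
    have h3 : ((k + 1 : Nat) : Int) - 1 = ((k : Nat) : Int) := by push_cast; ring
    simp only [Function.comp, h2, h3, PySem.List.pyGetD_natCast]
  rw [hfun, pvZipRange]
  rfl

-- fusing dedup with generation: A's dedup fold over labels = first component of B's
-- fused fold, whose last label is the accumulator's last element and comes from the input
theorem pvDedup_fused : ∀ (ls acc : List String) (last : String), acc.getLast? = some last →
    ls.foldl pvD acc = (ls.foldl pvB (acc, last)).1
  ∧ (ls.foldl pvB (acc, last)).1.getLast? = some (ls.foldl pvB (acc, last)).2
  ∧ ((ls.foldl pvB (acc, last)).2 = last ∨ (ls.foldl pvB (acc, last)).2 ∈ ls) := by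
  intro ls
  induction ls with
  | nil => intro acc last h; exact ⟨rfl, h, Or.inl rfl⟩
  | cons t rest ih =>
    intro acc last h
    have hacc : acc ≠ [] := by intro e; rw [e] at h; simp at h
    by_cases ht : t = last
    · have hD : pvD acc t = acc := by
        unfold pvD
        rw [if_neg (by rw [h, ht]; simp [hacc])]
      have hB : pvB (acc, last) t = (acc, last) := by
        unfold pvB; rw [if_neg]; simpa using ht
      rw [List.foldl_cons, List.foldl_cons, hD, hB]
      obtain ⟨e1, e2, e3⟩ := ih acc last h
      exact ⟨e1, e2, by rcases e3 with h' | h' <;> [exact Or.inl h'; exact Or.inr (List.mem_cons_of_mem _ h')]⟩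
    · have hD : pvD acc t = acc ++ [t] := by
        unfold pvD
        rw [if_pos]; right; rw [h]; simpa using fun e => ht e.symm
      have hB : pvB (acc, last) t = (acc ++ [t], t) := by
        unfold pvB; rw [if_pos]; simpa using ht
      rw [List.foldl_cons, List.foldl_cons, hD, hB]
      obtain ⟨e1, e2, e3⟩ := ih (acc ++ [t]) t (by simp)
      refine ⟨e1, e2, ?_⟩
      rcases e3 with h' | h'
      · exact Or.inr (by rw [h']; exact List.mem_cons_self)
      · exact Or.inr (List.mem_cons_of_mem _ h')

-- the whole non-degenerate branch
theorem pvMain (points : List (Int × Int)) :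
    (((PySem.List.pyRange 1 (points.length : Int) 1).foldl
      (fun instructions i =>
        let dx := (PySem.List.pyGetD points i (0, 0)).1 - (PySem.List.pyGetD points (i - 1) (0, 0)).1
        let dy := (PySem.List.pyGetD points i (0, 0)).2 - (PySem.List.pyGetD points (i - 1) (0, 0)).2
        if |dx| > |dy| then
          instructions ++ [if dx > 0 then "Turn right" else "Turn left"]
        else
          instructions ++ [if dy < 0 then "Go straight" else "Proceed down-lane"])
      ["Move to lane center"]) ++ ["Arrive at destination"]).foldl
      (fun dedup text =>
        if dedup = [] ∨ PySem.List.pyGet? dedup (-1) ≠ some text then dedup ++ [text] else dedup) []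
    = ((points.zip (points.drop 1)).foldl (fun (st : List String × String) pq =>
        let dx := pq.2.1 - pq.1.1
        let dy := pq.2.2 - pq.1.2
        let label :=
          if |dx| > |dy| then (if dx > 0 then "Turn right" else "Turn left")
          else (if dy < 0 then "Go straight" else "Proceed down-lane")
        if label ≠ st.2 then (st.1 ++ [label], label) else st)
        (["Move to lane center"], "Move to lane center")).1 ++ ["Arrive at destination"] := by
  have hD : (fun (dedup : List String) (text : String) =>
        if dedup = [] ∨ PySem.List.pyGet? dedup (-1) ≠ some text then dedup ++ [text] else dedup) = pvD := by
    funext d t; simp only [pvD, PySem.List.pyGet?_neg_one]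
  have hBfold : (points.zip (points.drop 1)).foldl (fun (st : List String × String) pq =>
        let dx := pq.2.1 - pq.1.1
        let dy := pq.2.2 - pq.1.2
        let label :=
          if |dx| > |dy| then (if dx > 0 then "Turn right" else "Turn left")
          else (if dy < 0 then "Go straight" else "Proceed down-lane")
        if label ≠ st.2 then (st.1 ++ [label], label) else st)
        (["Move to lane center"], "Move to lane center")
      = ((points.zip (points.drop 1)).map (fun pq => pvLab pq.1 pq.2)).foldl pvB
        (["Move to lane center"], "Move to lane center") := by
    rw [List.foldl_map]
    rfl
  rw [pvFold_gen, hD, hBfold]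
  obtain ⟨e1, e2, e3⟩ := pvDedup_fused ((points.zip (points.drop 1)).map (fun pq => pvLab pq.1 pq.2))
    ["Move to lane center"] "Move to lane center" rfl
  have hstep : pvD [] "Move to lane center" = ["Move to lane center"] := rfl
  rw [List.foldl_append, List.foldl_cons, List.foldl_nil, List.foldl_cons, hstep, e1]
  set S := ((points.zip (points.drop 1)).map (fun pq => pvLab pq.1 pq.2)).foldl pvB
    (["Move to lane center"], "Move to lane center") with hS
  have hne : S.2 ≠ "Arrive at destination" := by
    rcases e3 with h' | h'
    · rw [h']; decide
    · obtain ⟨pq, _, hpq⟩ := List.mem_map.mp h'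
      rw [← hpq]; exact pvLab_ne _ _
  unfold pvD
  rw [if_pos]
  right
  rw [e2]
  simpa using hne

-- ===== VERDICT (by name: the statement is the Claim_ definition above) =====
theorem path_instructions_py_spec : Claim_equal_path_instructions_py := by
  intro points _
  unfold Spec_path_instructions_py path_instructions_py path_instructions_py_alt
  split_ifs with h
  · rfl
  · exact pvMain points
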